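-- pv_equiv track=rewrite | github.com/Erotemic/utool | utool/util_dev.py | tuples_to_unique_scalars
-- ===== SOURCE A (Python) =====
-- def tuples_to_unique_scalars(tup_list):
--     seen = {}
--     def addval(tup):
--         val = len(seen)
--         seen[tup] = val
--         return val
--     scalar_list = [seen[tup] if tup in seen else addval(tup) for tup in tup_list]
--     return scalar_list
-- ===== SOURCE B (Python) =====
-- def tuples_to_unique_scalars(tup_list):
--     # id of t = number of distinct tuples strictly before t's first occurrence
--     return [len(set(tup_list[:tup_list.index(t)])) for t in tup_list]
-- ===== Notes on version B (the rewrite author's own statement) =====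
-- stated objective: alternative
-- what changed: B drops A's mutable hash map entirely: each element's id is computed independently as the cardinality of the set of tuples strictly before its first occurrence (list.index + prefix set), trading A's O(n) stateful single pass for a stateless quadratic formula.
import Mathlib
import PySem

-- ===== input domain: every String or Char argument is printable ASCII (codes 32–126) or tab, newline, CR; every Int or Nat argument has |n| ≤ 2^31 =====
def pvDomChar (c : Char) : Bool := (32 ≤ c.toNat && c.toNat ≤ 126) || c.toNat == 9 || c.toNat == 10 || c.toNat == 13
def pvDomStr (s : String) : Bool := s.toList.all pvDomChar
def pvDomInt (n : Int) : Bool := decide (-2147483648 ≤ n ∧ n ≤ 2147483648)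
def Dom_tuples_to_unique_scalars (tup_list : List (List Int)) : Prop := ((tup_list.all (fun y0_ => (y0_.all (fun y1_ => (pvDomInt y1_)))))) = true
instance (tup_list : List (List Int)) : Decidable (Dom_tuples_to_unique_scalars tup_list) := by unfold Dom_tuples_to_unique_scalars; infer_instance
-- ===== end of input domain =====

-- B replaces A's stateful hash-map pass by a stateless per-element formula:
-- id(t) = |set(prefix before t's first occurrence)| — a different (quadratic) algorithm, no dict.


-- ===== PORT A =====
-- the comprehension's loop: state = (seen, scalar_list); `tup in seen` → contains,
-- `seen[tup]` → getD (the key is present in that branch), addval appends (len(seen), insert)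
def tuples_to_unique_scalars (tup_list : List (List Int)) : List Int :=
  (tup_list.foldl
    (fun st tup =>
      if st.1.contains tup then (st.1, st.2 ++ [st.1.getD tup 0])
      else
        let val : Int := (st.1.size : Int)
        (st.1.insert tup val, st.2 ++ [val]))
    ((PySem.Dict.empty : PySem.Dict (List Int) Int), [])).2

-- ===== PORT B =====
-- [len(set(tup_list[:tup_list.index(t)])) for t in tup_list]; t is drawn from tup_list,
-- so tup_list.index(t) never raises — the none branch is unreachable
def tuples_to_unique_scalars_alt (tup_list : List (List Int)) : List Int :=
  tup_list.map (fun t =>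
    match PySem.List.index? tup_list t with
    | some j => ((PySem.Set.len
        (PySem.Set.ofList (PySem.List.slice tup_list none (some ((j : Nat) : Int))))) : Int)
    | none => 0)

-- ===== PRECONDITION & SPEC =====
def Spec_tuples_to_unique_scalars (tup_list : List (List Int)) (out : List Int) : Prop := out = tuples_to_unique_scalars_alt tup_list
instance (tup_list : List (List Int)) (out : List Int) : Decidable (Spec_tuples_to_unique_scalars tup_list out) := by unfold Spec_tuples_to_unique_scalars; infer_instance

-- ===== CLAIM (what is proved, stated in full; the proofs are below) =====
def Claim_equal_tuples_to_unique_scalars : Prop := ∀ (tup_list : List (List Int)), Dom_tuples_to_unique_scalars tup_list → Spec_tuples_to_unique_scalars tup_list (tuples_to_unique_scalars tup_list)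

-- ===== LEMMAS AND PROOFS =====

-- the dedup of a whole list, seen as continuing from an already-deduped prefix u
def pvUApp (u : List (List Int)) (rest : List (List Int)) : List (List Int) :=
  rest.foldl PySem.Set.add u

theorem pvUApp_cons (u : List (List Int)) (t : List Int) (rest : List (List Int)) :
    pvUApp u (t :: rest) = pvUApp (PySem.Set.add u t) rest := rfl

theorem pvUApp_prefix (rest : List (List Int)) : ∀ u, ∃ s, pvUApp u rest = u ++ s := by
  induction rest with
  | nil => exact fun u => ⟨[], by simp [pvUApp]⟩
  | cons t rest ih =>
    intro u
    rcases ih (PySem.Set.add u t) with ⟨s, hs⟩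
    rw [pvUApp_cons, hs]
    by_cases h : PySem.Set.contains u t = true
    · exact ⟨s, by rw [show PySem.Set.add u t = u by unfold PySem.Set.add; rw [if_pos h]]⟩
    · exact ⟨t :: s, by rw [show PySem.Set.add u t = u ++ [t] by unfold PySem.Set.add; rw [if_neg h]]; simp⟩

-- the A-loop invariant: seen is exactly "index in u₀" and its size is u₀.length
theorem pvLoopA (rest : List (List Int)) :
    ∀ (u : List (List Int)) (seen : PySem.Dict (List Int) Int) (acc : List Int),
    (∀ t, seen.get? t = if t ∈ u then some ((u.idxOf t : Int)) else none) →
    seen.size = u.length →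
    (rest.foldl
      (fun st tup =>
        if st.1.contains tup then (st.1, st.2 ++ [st.1.getD tup 0])
        else
          let val : Int := (st.1.size : Int)
          (st.1.insert tup val, st.2 ++ [val]))
      (seen, acc)).2
      = acc ++ rest.map (fun t => (((pvUApp u rest).idxOf t : Nat) : Int)) := by
  induction rest with
  | nil => intro u seen acc _ _; simp [pvUApp]
  | cons t rest ih =>
    intro u seen acc hget hsize
    have hcont : seen.contains t = (t ∈ u : Bool) := by
      rw [PySem.Dict.contains_eq_isSome_get?, hget t]
      by_cases h : t ∈ u <;> simp [h]
    by_cases hmem : t ∈ u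
    · -- already seen: dict unchanged, value = u.idxOf t
      have hval : seen.getD t 0 = ((u.idxOf t : Nat) : Int) := by
        rw [PySem.Dict.getD_eq_get?_getD, hget t]; simp [hmem]
      simp only [List.foldl_cons, hcont, hmem, decide_true, if_true, List.map_cons]
      have hadd : PySem.Set.add u t = u := by simp [PySem.Set.add, hmem]
      rw [ih u seen (acc ++ [seen.getD t 0]) hget hsize, hval]
      have hidx : (pvUApp u (t :: rest)).idxOf t = u.idxOf t := by
        rw [pvUApp_cons, hadd]
        rcases pvUApp_prefix rest u with ⟨s, hs⟩
        rw [hs, List.idxOf_append_of_mem hmem]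
      rw [pvUApp_cons, hadd] at hidx ⊢
      rw [hidx, List.append_assoc]
      rfl
    · -- fresh: insert at index u.length, continue with u ++ [t]
      simp only [List.foldl_cons, hcont, hmem, decide_false, Bool.false_eq_true, if_false, List.map_cons]
      have hget' : ∀ t', (seen.insert t ((seen.size : Nat) : Int)).get? t'
          = if t' ∈ u ++ [t] then some (((u ++ [t]).idxOf t' : Nat) : Int) else none := by
        intro t'
        by_cases he : t' = t
        · subst he
          rw [PySem.Dict.get?_insert_self, hsize]
          have : (u ++ [t']).idxOf t' = u.length := by
            rw [List.idxOf_append]; simp [hmem]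
          simp [this]
        · rw [PySem.Dict.get?_insert_of_ne _ _ he, hget t']
          have hm : (t' ∈ u ++ [t]) ↔ t' ∈ u := by simp [he]
          by_cases h' : t' ∈ u
          · have : (u ++ [t]).idxOf t' = u.idxOf t' := List.idxOf_append_of_mem h'
            simp [h', hm.mpr h', this]
          · simp [h', he]
      have hsize' : (seen.insert t ((seen.size : Nat) : Int)).size = (u ++ [t]).length := by
        rw [PySem.Dict.size_insert]
        simp [hcont, hmem, hsize]
      rw [ih (u ++ [t]) _ _ hget' hsize']
      have hadd : PySem.Set.add u t = u ++ [t] := by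
        simp [PySem.Set.add, hmem]
      have hidx : (pvUApp u (t :: rest)).idxOf t = u.length := by
        rw [pvUApp_cons, hadd]
        rcases pvUApp_prefix rest (u ++ [t]) with ⟨s, hs⟩
        rw [hs, List.append_assoc]
        rw [List.idxOf_append]
        simp [hmem]
      rw [pvUApp_cons, hadd] at hidx ⊢
      rw [hidx, hsize, List.append_assoc]
      rfl

-- A equals the pure index-in-dedup map
theorem pvA_eq (tup_list : List (List Int)) :
    tuples_to_unique_scalars tup_list
      = tup_list.map (fun t => (((PySem.List.dedup tup_list).idxOf t : Nat) : Int)) := by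
  unfold tuples_to_unique_scalars
  rw [pvLoopA tup_list [] PySem.Dict.empty []
      (fun t => by simp [PySem.Dict.get?_empty]) (by simp [PySem.Dict.size_empty])]
  rfl

-- B's per-element value: |set(pre)| where pre is the part before the first occurrence
-- equals the index of t in dedup of the whole list
theorem pvB_eq (tup_list : List (List Int)) :
    tuples_to_unique_scalars_alt tup_list
      = tup_list.map (fun t => (((PySem.List.dedup tup_list).idxOf t : Nat) : Int)) := by
  unfold tuples_to_unique_scalars_alt
  apply List.map_congr_left
  intro t ht
  have hsome : ∃ j, PySem.List.index? tup_list t = some j := by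
    have := (PySem.List.index?_isSome_iff tup_list t).mpr ht
    exact Option.isSome_iff_exists.mp this
  rcases hsome with ⟨j, hj⟩
  rw [hj]
  change (PySem.Set.len (PySem.Set.ofList (PySem.List.slice tup_list none (some ((j : Nat) : Int))))) = _
  rcases (PySem.List.index?_eq_some_iff tup_list t j).mp hj with ⟨pre, suf, hsplit, hlen, hnotin⟩
  have hslice : PySem.List.slice tup_list none (some ((j : Nat) : Int)) = pre := by
    rw [PySem.List.slice_to_natCast, hsplit, ← hlen, List.take_left]
  rw [hslice]
  -- reduce both sides to lengths/indices in foldl Set.add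
  have hded : PySem.List.dedup tup_list = pvUApp (pvUApp [] pre) (t :: suf) := by
    rw [PySem.List.dedup_eq_ofList, PySem.Set.ofList_eq_foldl, hsplit]
    show (pre ++ t :: suf).foldl PySem.Set.add [] = _
    rw [List.foldl_append]; rfl
  have hset : PySem.Set.ofList pre = pvUApp [] pre := by
    rw [PySem.Set.ofList_eq_foldl]; rfl
  set u := pvUApp [] pre with hu
  have hunotin : t ∉ u := by
    rw [← hset]
    intro hmem
    exact hnotin ((PySem.Set.mem_ofList pre t).mp hmem)
  have hadd : PySem.Set.add u t = u ++ [t] := by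
    simp [PySem.Set.add, PySem.Set.contains, hunotin]
  have hidx : (PySem.List.dedup tup_list).idxOf t = u.length := by
    rw [hded, pvUApp_cons, hadd]
    rcases pvUApp_prefix suf (u ++ [t]) with ⟨s, hs⟩
    rw [hs, List.append_assoc, List.idxOf_append]
    simp [hunotin]
  rw [hidx, hset]
  simp [PySem.Set.len]

-- ===== VERDICT (by name: the statement is the Claim_ definition above) =====
theorem tuples_to_unique_scalars_spec : Claim_equal_tuples_to_unique_scalars := by
  intro tup_list _
  show tuples_to_unique_scalars tup_list = tuples_to_unique_scalars_alt tup_list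
  rw [pvA_eq, pvB_eq]
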